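-- pv_equiv track=rewrite | github.com/thegituseri/Skyscraper_ML | new_SkySolver.py | total_same_row_and_column_occurrences_5x5
-- ===== SOURCE A (Python) =====
-- def total_same_row_and_column_occurrences_5x5(grid):
--     total = 0
--     for i in range(5):
--         seen_row = set()
--         seen_col = set()
--         for j in range(5):
--             vr = grid[i][j]
--             vc = grid[j][i]
--             if vr in seen_row:
--                 total += 1
--             else:
--                 seen_row.add(vr)
--             if vc in seen_col:
--                 total += 1
--             else:
--                 seen_col.add(vc)
--     return total
-- ===== SOURCE B (Python) =====
-- def total_same_row_and_column_occurrences_5x5(grid):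
--     total = 0
--     for i in range(5):
--         row = [grid[i][j] for j in range(5)]
--         col = [grid[j][i] for j in range(5)]
--         for line in (row, col):
--             s = sorted(line)
--             total += sum(a == b for a, b in zip(s, s[1:]))
--     return total
-- ===== Notes on version B (the rewrite author's own statement) =====
-- stated objective: alternative
-- what changed: Replaces A's hash-set membership bookkeeping with a sort-then-scan per line: each row/column is sorted and its duplicates are counted as the number of equal adjacent pairs in the sorted list.
import Mathlib
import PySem

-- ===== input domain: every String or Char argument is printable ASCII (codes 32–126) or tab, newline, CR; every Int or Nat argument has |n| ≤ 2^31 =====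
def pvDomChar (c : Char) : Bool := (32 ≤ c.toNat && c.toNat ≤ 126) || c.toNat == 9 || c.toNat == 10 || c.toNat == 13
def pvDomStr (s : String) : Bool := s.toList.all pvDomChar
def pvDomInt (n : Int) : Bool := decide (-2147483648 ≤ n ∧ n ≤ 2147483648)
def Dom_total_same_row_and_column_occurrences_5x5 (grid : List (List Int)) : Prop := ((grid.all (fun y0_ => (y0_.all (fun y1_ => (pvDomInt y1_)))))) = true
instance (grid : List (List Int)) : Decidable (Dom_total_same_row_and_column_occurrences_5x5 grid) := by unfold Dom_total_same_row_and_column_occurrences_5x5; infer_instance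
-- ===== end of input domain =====

-- B counts each line's duplicates by sorting the line and counting equal adjacent
-- pairs, instead of A's incremental seen-set membership branches (objective: alternative).

-- ===== PORT A =====
-- grid[i][j]; total form, used only where Pre_ puts the indices in range
def pvCellA (grid : List (List Int)) (i j : Int) : Int :=
  (PySem.List.pyGet? (PySem.List.pyGet? grid i |>.getD []) j).getD 0

def total_same_row_and_column_occurrences_5x5 (grid : List (List Int)) : Int :=
  ((PySem.List.pyRange 0 5 1).foldl (fun (total : Int) i =>
    ((PySem.List.pyRange 0 5 1).foldl
      (fun (st : Int × PySem.Set Int × PySem.Set Int) j =>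
        let vr := pvCellA grid i j
        let vc := pvCellA grid j i
        let st1 : Int × PySem.Set Int × PySem.Set Int :=
          if PySem.Set.contains st.2.1 vr then (st.1 + 1, st.2.1, st.2.2)
          else (st.1, PySem.Set.add st.2.1 vr, st.2.2)
        if PySem.Set.contains st1.2.2 vc then (st1.1 + 1, st1.2.1, st1.2.2)
        else (st1.1, st1.2.1, PySem.Set.add st1.2.2 vc))
      (total, PySem.Set.empty, PySem.Set.empty)).1) 0)

-- ===== PORT B =====
def pvCellB (grid : List (List Int)) (i j : Int) : Int :=
  (PySem.List.pyGet? (PySem.List.pyGet? grid i |>.getD []) j).getD 0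

-- sum(a == b for a, b in zip(s, s[1:])) over an already-sorted line s
def pvScan (s : List Int) : Int :=
  (s.zip (PySem.List.slice s (some 1) none)).foldl
    (fun (acc : Int) p => acc + (if p.1 = p.2 then 1 else 0)) 0

-- s = sorted(line); then the adjacent scan
def pvDups (line : List Int) : Int :=
  pvScan (PySem.List.sorted line (fun x => x) false)

def total_same_row_and_column_occurrences_5x5_alt (grid : List (List Int)) : Int :=
  (PySem.List.pyRange 0 5 1).foldl (fun (total : Int) i =>
    let row := (PySem.List.pyRange 0 5 1).map (fun j => pvCellB grid i j)
    let col := (PySem.List.pyRange 0 5 1).map (fun j => pvCellB grid j i)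
    [row, col].foldl (fun (t : Int) line => t + pvDups line) total) 0

-- ===== PRECONDITION & SPEC =====
-- A indexes grid[i][j] and grid[j][i] for i,j in 0..4: it raises IndexError unless the
-- grid has at least 5 rows and each of the first 5 rows has at least 5 entries.
def Pre_total_same_row_and_column_occurrences_5x5 (grid : List (List Int)) : Prop :=
  5 ≤ grid.length ∧ ∀ row ∈ grid.take 5, 5 ≤ row.length
instance (grid : List (List Int)) : Decidable (Pre_total_same_row_and_column_occurrences_5x5 grid) := by unfold Pre_total_same_row_and_column_occurrences_5x5; infer_instance

def pvWitness_total_same_row_and_column_occurrences_5x5 : List (List Int) :=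
  [[1,2,3,4,5],[2,3,4,5,1],[3,4,5,1,2],[4,5,1,2,3],[5,1,2,3,4]]

def Spec_total_same_row_and_column_occurrences_5x5 (grid : List (List Int)) (out : Int) : Prop := out = total_same_row_and_column_occurrences_5x5_alt grid
instance (grid : List (List Int)) (out : Int) : Decidable (Spec_total_same_row_and_column_occurrences_5x5 grid out) := by unfold Spec_total_same_row_and_column_occurrences_5x5; infer_instance

-- ===== CLAIM (what is proved, stated in full; the proofs are below) =====
def Claim_equal_total_same_row_and_column_occurrences_5x5 : Prop := ∀ (grid : List (List Int)), Dom_total_same_row_and_column_occurrences_5x5 grid → Pre_total_same_row_and_column_occurrences_5x5 grid → Spec_total_same_row_and_column_occurrences_5x5 grid (total_same_row_and_column_occurrences_5x5 grid)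

-- ===== LEMMAS AND PROOFS =====

-- duplicate count of l relative to an already-seen set s, as A's loop computes it
def pvDupC (l : List Int) (s : PySem.Set Int) : Int :=
  match l with
  | [] => 0
  | v :: l => (if PySem.Set.contains s v then 1 else 0) + pvDupC l (PySem.Set.add s v)

lemma pvDupC_eq (l : List Int) (s : PySem.Set Int) (hs : s.Nodup) :
    pvDupC l s = (l.length : Int) - ((PySem.Set.update s l).length - (s.length : Int)) := by
  induction l generalizing s with
  | nil => simp [pvDupC, PySem.Set.update]
  | cons v l ih =>
    by_cases hv : v ∈ s
    · simp [pvDupC, PySem.Set.update_cons, hv, ih s hs]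
      omega
    · have hn : (PySem.Set.add s v).Nodup := PySem.Set.nodup_add s v hs
      have ih' := ih _ hn
      rw [PySem.Set.add_of_not_mem hv] at ih'
      simp at ih'
      simp [pvDupC, PySem.Set.update_cons, hv, ih']
      omega

lemma pvDupC_ofList (l : List Int) :
    pvDupC l PySem.Set.empty = (l.length : Int) - ((PySem.Set.ofList l).length : Int) := by
  have := pvDupC_eq l PySem.Set.empty (by simp [PySem.Set.empty])
  simpa [PySem.Set.empty, PySem.Set.update_nil_left] using this

-- A's interleaved inner fold splits into two independent duplicate counts
lemma pvInterleave (js : List Int) (f g : Int → Int) (t : Int) (sr sc : PySem.Set Int) :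
    (js.foldl
      (fun (st : Int × PySem.Set Int × PySem.Set Int) j =>
        let vr := f j
        let vc := g j
        let st1 : Int × PySem.Set Int × PySem.Set Int :=
          if PySem.Set.contains st.2.1 vr then (st.1 + 1, st.2.1, st.2.2)
          else (st.1, PySem.Set.add st.2.1 vr, st.2.2)
        if PySem.Set.contains st1.2.2 vc then (st1.1 + 1, st1.2.1, st1.2.2)
        else (st1.1, st1.2.1, PySem.Set.add st1.2.2 vc))
      (t, sr, sc))
    = (t + pvDupC (js.map f) sr + pvDupC (js.map g) sc,
       PySem.Set.update sr (js.map f), PySem.Set.update sc (js.map g)) := by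
  induction js generalizing t sr sc with
  | nil => simp [pvDupC, PySem.Set.update]
  | cons j js ih =>
    rw [List.foldl_cons]
    simp only [List.map_cons, pvDupC, PySem.Set.update_cons]
    split_ifs with h1 h2 h2 <;>
      (try rw [PySem.Set.add_of_mem (show f j ∈ sr by simpa using h1)]) <;>
      (try rw [PySem.Set.add_of_mem (show g j ∈ sc by simpa using h2)]) <;>
      dsimp only <;> rw [ih] <;> simp [Prod.ext_iff] <;> omega

-- number of equal adjacent pairs
def pvAdjC (l : List Int) : Nat :=
  match l with
  | a :: b :: t => (if a = b then 1 else 0) + pvAdjC (b :: t)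
  | _ => 0

lemma pvZipFold_eq_adjC (a : Int) (s : List Int) (c : Int) :
    ((List.zip (a :: s) s).foldl (fun (acc : Int) p => acc + (if p.1 = p.2 then 1 else 0)) c)
      = c + (pvAdjC (a :: s) : Int) := by
  induction s generalizing a c with
  | nil => simp [pvAdjC]
  | cons b t ih =>
    simp only [List.zip_cons_cons, List.foldl_cons, pvAdjC, ih b]
    push_cast
    split_ifs <;> ring

-- for a sorted list, adjacent-equal pairs + distinct values = length
lemma pvAdjC_sorted (s : List Int) (hs : s.Pairwise (· ≤ ·)) :
    pvAdjC s + s.toFinset.card = s.length := by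
  induction s with
  | nil => simp [pvAdjC]
  | cons a s ih =>
    cases s with
    | nil => simp [pvAdjC]
    | cons b t =>
      have hp : (b :: t).Pairwise (· ≤ ·) := hs.of_cons
      have hmem : a ∈ b :: t ↔ a = b := by
        constructor
        · intro h
          have hab : a ≤ b := (List.pairwise_cons.mp hs).1 b (by simp)
          rcases List.mem_cons.mp h with h | h
          · exact h
          · have hba : b ≤ a := (List.pairwise_cons.mp hp).1 a h
            omega
        · intro h; simp [h]
      have ih' := ih hp
      by_cases hab : a = b
      · have h1 : (a :: b :: t).toFinset = (b :: t).toFinset := by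
          subst hab; simp
        have h2 : pvAdjC (a :: b :: t) = 1 + pvAdjC (b :: t) := by
          simp [pvAdjC, hab]
        rw [h1, h2, List.length_cons]
        omega
      · have hnm : a ∉ (b :: t).toFinset := by
          simp only [List.mem_toFinset, hmem]; exact hab
        have h1 : (a :: b :: t).toFinset.card = (b :: t).toFinset.card + 1 := by
          rw [List.toFinset_cons, Finset.card_insert_of_notMem hnm]
        have h2 : pvAdjC (a :: b :: t) = pvAdjC (b :: t) := by
          simp [pvAdjC, hab]
        rw [h1, h2, List.length_cons]
        omega

lemma pvOfList_length_eq_card (l : List Int) :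
    (PySem.Set.ofList l).length = l.toFinset.card := by
  have hnd : (PySem.Set.ofList l).Nodup := PySem.Set.nodup_ofList l
  have hfs : (PySem.Set.ofList l).toFinset = l.toFinset := by
    ext x; simp [List.mem_toFinset, PySem.Set.mem_ofList]
  rw [← hfs, List.toFinset_card_of_nodup hnd]

-- B's per-line count equals length minus distinct count
lemma pvDups_eq (l : List Int) :
    pvDups l = (l.length : Int) - ((PySem.Set.ofList l).length : Int) := by
  unfold pvDups pvScan
  rw [PySem.List.slice_from_one]
  set s := PySem.List.sorted l (fun x => x) false with hsdef
  have hperm : s.Perm l := PySem.List.sorted_perm l (fun x => x) false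
  have hsort : s.Pairwise (· ≤ ·) := PySem.List.sorted_pairwise l (fun x => x)
  have hlen : s.length = l.length := hperm.length_eq
  have hfs : s.toFinset = l.toFinset := by
    ext x; simp [List.mem_toFinset, hperm.mem_iff]
  have hfold :
      ((List.zip s s.tail).foldl (fun (acc : Int) p => acc + (if p.1 = p.2 then 1 else 0)) 0)
        = (pvAdjC s : Int) := by
    cases s with
    | nil => simp [pvAdjC]
    | cons a t => simpa using pvZipFold_eq_adjC a t 0
  rw [hfold, pvOfList_length_eq_card, ← hfs, ← hlen]
  have := pvAdjC_sorted s hsort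
  omega

theorem total_same_row_and_column_occurrences_5x5_spec' (grid : List (List Int)) :
    total_same_row_and_column_occurrences_5x5 grid
      = total_same_row_and_column_occurrences_5x5_alt grid := by
  unfold total_same_row_and_column_occurrences_5x5 total_same_row_and_column_occurrences_5x5_alt
  refine congrArg (fun f => List.foldl f (0 : Int) (PySem.List.pyRange 0 5 1)) ?_
  funext total i
  rw [pvInterleave (PySem.List.pyRange 0 5 1) (fun j => pvCellA grid i j) (fun j => pvCellA grid j i)]
  simp only [List.foldl_cons, List.foldl_nil, pvDups_eq, pvDupC_ofList]
  have h5 : ((PySem.List.pyRange 0 5 1).length : Int) = 5 := by decide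
  simp only [List.length_map, h5, pvCellA, pvCellB]

-- ===== VERDICT (by name: the statement is the Claim_ definition above) =====
theorem total_same_row_and_column_occurrences_5x5_spec : Claim_equal_total_same_row_and_column_occurrences_5x5 := by
  intro grid _ _
  exact total_same_row_and_column_occurrences_5x5_spec' grid
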